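-- pv_equiv track=rewrite | github.com/Fleischmaki/Fuzzle | maze-gen/smt2_parser.py | get_negated
-- ===== SOURCE A (Python) =====
-- def extract_vars(cond, variables):
--     vars = dict()
--     for var, type in variables.items():
--         if var + " " in cond or var + ")" in cond or cond.split('[')[0] in cond:
--             vars[var] = type
--     return vars
--
-- def get_negated(conds, group, vars, numb):
--     negated_groups = list()
--     new_vars = list()
--     n = 0
--     for cond in group:
--         if conds[cond] == True:
--             n = n + 1
--     if n >= numb:
--         negated = set()
--         for i in range(numb):
--             negated_group = set()
--             for cond in group:
--                 if conds[cond] == True and len(negated) <= i and cond not in negated: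
--                         negated_group.add("(!" + cond + ")")
--                         negated.add(cond)
--                 else:
--                     negated_group.add(cond)
--             negated_groups.append(negated_group)
--     else:
--         for i in range(numb):
--             new_group = set()
--             new_var = "c" + str(i)
--             # negate one of the original and add same conds for new var
--             for cond in group:
--                 if conds[cond] == True:
--                     cond_neg = "(!" + cond + ")"
--                     break
--             new_group.add(cond_neg)
--             for cond in group:
--                 cond_vars = extract_vars(cond, vars)
--                 for v in cond_vars:
--                     cond_new = cond.replace(v, new_var)
--                 new_group.add(cond_new)
--             negated_groups.append(new_group)
--             new_vars.append(new_var)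
--     return negated_groups, new_vars
-- ===== SOURCE B (Python) =====
-- def get_negated(conds, group, variables, numb):
--     trues = [c for c in group if conds[c] == True]
--     if len(trues) >= numb:
--         ts = list(dict.fromkeys(trues))
--         negated_groups = []
--         for i in range(numb):
--             if i < len(ts):
--                 t = ts[i]
--                 j = group.index(t)
--                 negated_groups.append(set(group[:j] + ["(!" + t + ")"] + group[j + 1:]))
--             else:
--                 negated_groups.append(set(group))
--         return negated_groups, []
--     else:
--         neg = "(!" + trues[0] + ")"
--         new_vars = ["c" + str(i) for i in range(numb)]
--         negated_groups = []
--         for nv in new_vars: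
--             new_group = {neg}
--             for cond in group:
--                 for v in variables:
--                     cond = cond.replace(v, nv)
--                 new_group.add(cond)
--             negated_groups.append(new_group)
--         return negated_groups, new_vars
-- ===== Notes on version B (the rewrite author's own statement) =====
-- stated objective: simpler
-- what changed: The n>=numb branch replaces A's persistent `negated` set and its len/membership guards by direct indexing into the precomputed ordered list of distinct true conds (negating the first occurrence of ts[i] via index/slice); the else branch drops the extract_vars scan (its `cond.split('[')[0] in cond` guard is vacuously true, so it always keeps every variable) and substitutes every variable name into each cond cumulatively.
-- intended difference: When fewer conds are true than numb and some cond of group contains a variable name other than the last dict key, A substitutes the new variable only for the last key (its inner loop overwrites cond_new each iteration, discarding every earlier replacement), while B substitutes every variable name, which is the evident intent of that substitution loop. — e.g. on get_negated([("a<b", true)], ["a<b"], [("a", "int"), ("b", "int")], 2): A returns ([["(!a<b)", "a<c0"], ["(!a<b)", "a<c1"]], ["c0", "c1"]), B returns ([["(!a<b)", "c0<c0"], ["(!a<b)", "c1<c1"]], ["c0", "c1"])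
import Mathlib
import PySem

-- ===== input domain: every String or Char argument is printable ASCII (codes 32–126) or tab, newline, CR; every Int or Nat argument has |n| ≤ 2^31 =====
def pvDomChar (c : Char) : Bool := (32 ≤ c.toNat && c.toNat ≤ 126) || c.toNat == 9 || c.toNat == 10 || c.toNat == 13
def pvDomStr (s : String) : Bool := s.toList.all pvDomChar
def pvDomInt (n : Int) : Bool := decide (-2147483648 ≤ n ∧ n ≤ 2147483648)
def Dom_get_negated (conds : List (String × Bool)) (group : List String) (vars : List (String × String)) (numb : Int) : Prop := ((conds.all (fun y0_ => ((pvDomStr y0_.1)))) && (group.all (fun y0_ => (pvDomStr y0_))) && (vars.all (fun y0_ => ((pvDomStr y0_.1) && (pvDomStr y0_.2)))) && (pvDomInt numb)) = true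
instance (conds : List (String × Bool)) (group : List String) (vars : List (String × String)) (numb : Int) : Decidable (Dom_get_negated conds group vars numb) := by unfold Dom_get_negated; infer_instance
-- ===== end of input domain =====

-- B replaces A's stateful `negated` bookkeeping by direct indexing into the ordered list of
-- distinct true conditions, and in the else branch substitutes every variable name of `vars`
-- into each cond (A's inner loop discards all but the last replacement; that intended
-- difference is stated as D_ below).  Sets are insertion-ordered duplicate-free lists (PySem.Set).

-- ===== PORT A =====
-- conds[c] == True as a Bool predicate (shared spelling of the same Python expression)
def pvP (conds : List (String × Bool)) (c : String) : Bool :=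
  (PySem.Dict.ofList conds).getD c false == true

def extract_vars (cond : String) (vdict : PySem.Dict String String) : PySem.Dict String String :=
  vdict.items.foldl
    (fun vs p =>
      if PySem.Str.isIn (p.1 ++ " ") cond || PySem.Str.isIn (p.1 ++ ")") cond
          || PySem.Str.isIn (((PySem.Str.split? cond "[").getD []).getD 0 "") cond
      then vs.insert p.1 p.2 else vs)
    PySem.Dict.empty

-- body of `for cond in group` in the n >= numb branch (state: negated_group, negated)
def pvAInner (P : String → Bool) (i : Int) (p : PySem.Set String × PySem.Set String) (cond : String) :
    PySem.Set String × PySem.Set String :=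
  if P cond = true ∧ PySem.Set.len p.2 ≤ i ∧ PySem.Set.contains p.2 cond = false then
    (PySem.Set.add p.1 ("(!" ++ cond ++ ")"), PySem.Set.add p.2 cond)
  else (PySem.Set.add p.1 cond, p.2)

-- body of `for i in range(numb)` in the n >= numb branch (state: negated_groups, negated)
def pvAOuter1 (P : String → Bool) (group : List String)
    (st : List (List String) × PySem.Set String) (i : Int) :
    List (List String) × PySem.Set String :=
  let inner := group.foldl (pvAInner P i) (PySem.Set.empty, st.2)
  (st.1 ++ [inner.1], inner.2)

-- body of `for i in range(numb)` in the else branch (state: negated_groups, new_vars, cond_new;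
-- cond_new carries Python's leftover binding, "" standing for 'unbound', reached only outside Pre_)
def pvAElse (P : String → Bool) (group : List String) (vars : List (String × String))
    (st : List (List String) × List String × String) (i : Int) :
    List (List String) × List String × String :=
  let new_var := "c" ++ PySem.Int.toStr i
  let cond_neg := match group.find? P with
    | some c => "(!" ++ c ++ ")"
    | none => ""   -- Python raises NameError here (cond_neg unbound); outside Pre_
  let inner := group.foldl
    (fun (p : PySem.Set String × String) cond =>
      let cond_vars := extract_vars cond (PySem.Dict.ofList vars)
      let cond_new := cond_vars.keys.foldl (fun _ v => PySem.Str.replace cond v new_var) p.2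
      (PySem.Set.add p.1 cond_new, cond_new))
    (PySem.Set.add PySem.Set.empty cond_neg, st.2.2)
  (st.1 ++ [inner.1], st.2.1 ++ [new_var], inner.2)

def get_negated (conds : List (String × Bool)) (group : List String) (vars : List (String × String)) (numb : Int) : List (List String) × List String :=
  let n : Int := group.foldl (fun n c => if pvP conds c then n + 1 else n) 0
  if n ≥ numb then
    let r := (PySem.List.pyRange 0 numb 1).foldl (pvAOuter1 (pvP conds) group) ([], PySem.Set.empty)
    (r.1, [])
  else
    let r := (PySem.List.pyRange 0 numb 1).foldl (pvAElse (pvP conds) group vars) ([], [], "")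
    (r.1, r.2.1)

-- ===== PORT B =====
-- set(group[:j] + ["(!"+t+")"] + group[j+1:]) for t = ts[i], j = group.index(t); set(group) past ts
def pvBGroup (group : List String) (ts : List String) (i : Int) : List String :=
  if i < (ts.length : Int) then
    let t := PySem.List.pyGetD ts i ""
    let j := (PySem.List.index? group t).getD 0
    PySem.Set.ofList
      (PySem.List.slice group none (some (j : Int)) ++ ["(!" ++ t ++ ")"]
        ++ PySem.List.slice group (some ((j : Int) + 1)) none)
  else PySem.Set.ofList group

-- `new_group = {neg}; for cond in group: for v in variables: cond = cond.replace(v, nv); new_group.add(cond)`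
def pvBElseGroup (keys : List String) (neg : String) (group : List String) (nv : String) : List String :=
  group.foldl
    (fun g cond => PySem.Set.add g (keys.foldl (fun c v => PySem.Str.replace c v nv) cond))
    (PySem.Set.add PySem.Set.empty neg)

def get_negated_alt (conds : List (String × Bool)) (group : List String) (vars : List (String × String)) (numb : Int) : List (List String) × List String :=
  let trues := group.filter (pvP conds)
  if (trues.length : Int) ≥ numb then
    let ts := PySem.List.dedup trues
    ((PySem.List.pyRange 0 numb 1).map (pvBGroup group ts), [])
  else
    let neg := "(!" ++ PySem.List.pyGetD trues 0 "" ++ ")"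
    let new_vars := (PySem.List.pyRange 0 numb 1).map (fun i => "c" ++ PySem.Int.toStr i)
    (new_vars.map (pvBElseGroup (PySem.Dict.ofList vars).keys neg group), new_vars)

-- ===== PRECONDITION & SPEC =====
-- Pre_ excludes exactly the inputs on which Python A raises: a KeyError when some cond of group
-- is not a key of conds, and a NameError in the else branch (taken iff the number of true conds
-- is < numb) when group has no true cond (cond_neg unbound) or vars is empty (cond_new unbound).
def Pre_get_negated (conds : List (String × Bool)) (group : List String) (vars : List (String × String)) (numb : Int) : Prop :=
  (∀ c ∈ group, (PySem.Dict.ofList conds).contains c = true) ∧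
  ((List.countP (pvP conds) group : Int) < numb →
    group.filter (pvP conds) ≠ [] ∧ vars ≠ [])
instance (conds : List (String × Bool)) (group : List String) (vars : List (String × String)) (numb : Int) : Decidable (Pre_get_negated conds group vars numb) := by unfold Pre_get_negated; infer_instance

def pvWitness_get_negated : (List (String × Bool)) × List String × (List (String × String)) × Int :=
  ([("x > 0", true), ("y == 2", false)], ["x > 0", "y == 2"], [("x", "int")], 1)

-- When fewer conds are true than numb and some cond of group contains a variable name other than
-- the last distinct key of vars, A substitutes the new variable only for that last key (its inner
-- loop overwrites cond_new each iteration, discarding every earlier replacement), while B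
-- substitutes every variable name, which is the evident intent of that substitution loop.
def D_get_negated (conds : List (String × Bool)) (group : List String) (vars : List (String × String)) (numb : Int) : Prop :=
  ((List.countP (pvP conds) group : Int) < numb) ∧
  ∃ c ∈ group, ∃ k ∈ (PySem.Set.ofList (vars.map Prod.fst)).dropLast, PySem.Str.isIn k c = true
instance (conds : List (String × Bool)) (group : List String) (vars : List (String × String)) (numb : Int) : Decidable (D_get_negated conds group vars numb) := by unfold D_get_negated; infer_instance

def Spec_get_negated (conds : List (String × Bool)) (group : List String) (vars : List (String × String)) (numb : Int) (out : List (List String) × List String) : Prop := ¬ D_get_negated conds group vars numb → out = get_negated_alt conds group vars numb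
instance (conds : List (String × Bool)) (group : List String) (vars : List (String × String)) (numb : Int) (out : List (List String) × List String) : Decidable (Spec_get_negated conds group vars numb out) := by unfold Spec_get_negated; infer_instance

def pvDiffWitness_get_negated : (List (String × Bool)) × List String × (List (String × String)) × Int :=
  ([("a<b", true)], ["a<b"], [("a", "int"), ("b", "int")], 2)
def pvDiffWitnessOut_get_negated : (List (List String) × List String) × (List (List String) × List String) :=
  (([["(!a<b)", "a<c0"], ["(!a<b)", "a<c1"]], ["c0", "c1"]),
   ([["(!a<b)", "c0<c0"], ["(!a<b)", "c1<c1"]], ["c0", "c1"]))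

-- ===== CLAIM (what is proved, stated in full; the proofs are below) =====
def Claim_unchanged_get_negated : Prop := ∀ (conds : List (String × Bool)) (group : List String) (vars : List (String × String)) (numb : Int), Dom_get_negated conds group vars numb → Pre_get_negated conds group vars numb → Spec_get_negated conds group vars numb (get_negated conds group vars numb)
def Claim_changed_get_negated : Prop := Dom_get_negated (pvDiffWitness_get_negated.1) (pvDiffWitness_get_negated.2.1) (pvDiffWitness_get_negated.2.2.1) (pvDiffWitness_get_negated.2.2.2) ∧ Pre_get_negated (pvDiffWitness_get_negated.1) (pvDiffWitness_get_negated.2.1) (pvDiffWitness_get_negated.2.2.1) (pvDiffWitness_get_negated.2.2.2) ∧ D_get_negated (pvDiffWitness_get_negated.1) (pvDiffWitness_get_negated.2.1) (pvDiffWitness_get_negated.2.2.1) (pvDiffWitness_get_negated.2.2.2) ∧ get_negated (pvDiffWitness_get_negated.1) (pvDiffWitness_get_negated.2.1) (pvDiffWitness_get_negated.2.2.1) (pvDiffWitness_get_negated.2.2.2) = pvDiffWitnessOut_get_negated.1 ∧ get_negated_alt (pvDiffWitness_get_negated.1) (pvDiffWitness_get_negated.2.1) (pvDiffWitness_get_negated.2.2.1)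 (pvDiffWitness_get_negated.2.2.2) = pvDiffWitnessOut_get_negated.2 ∧ pvDiffWitnessOut_get_negated.1 ≠ pvDiffWitnessOut_get_negated.2

-- ===== LEMMAS AND PROOFS =====

theorem pv_witness_ok :
    Dom_get_negated (pvWitness_get_negated.1) (pvWitness_get_negated.2.1) (pvWitness_get_negated.2.2.1) (pvWitness_get_negated.2.2.2) ∧
    Pre_get_negated (pvWitness_get_negated.1) (pvWitness_get_negated.2.1) (pvWitness_get_negated.2.2.1) (pvWitness_get_negated.2.2.2) := by
  constructor <;> decide

-- a loop `for _ in ks: x = h(v)` keeps only the last assignment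
theorem pv_foldl_last {α β : Type} (h : β → α) :
    ∀ (ks : List β) (init : α) (hk : ks ≠ []),
      ks.foldl (fun _ v => h v) init = h (ks.getLast hk) := by
  intro ks
  induction ks with
  | nil => intro _ hk; exact absurd rfl hk
  | cons x t ih =>
    intro init hk
    cases t with
    | nil => simp
    | cons y u =>
      rw [List.foldl_cons, List.getLast_cons (by simp : (y::u) ≠ [])]
      exact ih (h x) (by simp)


-- ---- first branch ----

-- conds whose P is already negated (or false) are added verbatim
theorem pv_skip_fold (P : String → Bool) (i : Int) :
    ∀ (l : List String) (g neg : PySem.Set String),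
      (∀ c ∈ l, P c = true → PySem.Set.contains neg c = true) →
      l.foldl (pvAInner P i) (g, neg) = (l.foldl PySem.Set.add g, neg) := by
  intro l
  induction l with
  | nil => intro g neg _; rfl
  | cons c t ih =>
    intro g neg h
    rw [List.foldl_cons, List.foldl_cons]
    have hstep : pvAInner P i (g, neg) c = (PySem.Set.add g c, neg) := by
      unfold pvAInner
      by_cases hc : P c = true
      · have := h c (by simp) hc
        rw [if_neg]; rintro ⟨_, _, hcon⟩; rw [this] at hcon; exact absurd hcon (by simp)
      · rw [if_neg]; rintro ⟨h1, _, _⟩; exact hc h1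
    rw [hstep]
    exact ih _ _ (fun c hc => h c (by simp [hc]))

-- once len(negated) exceeds i, everything is added verbatim
theorem pv_plain_fold (P : String → Bool) (i : Int) :
    ∀ (l : List String) (g neg : PySem.Set String), i < PySem.Set.len neg →
      l.foldl (pvAInner P i) (g, neg) = (l.foldl PySem.Set.add g, neg) := by
  intro l
  induction l with
  | nil => intro g neg _; rfl
  | cons c t ih =>
    intro g neg h
    rw [List.foldl_cons, List.foldl_cons]
    have hstep : pvAInner P i (g, neg) c = (PySem.Set.add g c, neg) := by
      unfold pvAInner
      rw [if_neg]; rintro ⟨_, hlen, _⟩; exact absurd hlen (not_le.mpr h)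
    rw [hstep]
    exact ih _ _ h

-- the dedup of the true conds splits at the first occurrence of a true cond t
theorem pv_ts_split (P : String → Bool) (pre suf : List String) (t : String)
    (hPt : P t = true) (hnpre : t ∉ pre) :
    ∃ r, PySem.List.dedup ((pre ++ t :: suf).filter P)
        = PySem.Set.ofList (pre.filter P) ++ t :: r := by
  rw [PySem.List.dedup_eq_ofList, List.filter_append, List.filter_cons_of_pos hPt]
  rw [PySem.Set.ofList_append, PySem.Set.update_cons]
  have hadd : (PySem.Set.ofList (pre.filter P)).add t = PySem.Set.ofList (pre.filter P) ++ [t] := by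
    apply PySem.Set.add_of_not_mem
    rw [PySem.Set.mem_ofList]
    intro hmem; exact hnpre (List.mem_of_mem_filter hmem)
  rw [hadd, PySem.Set.update_eq_append_filter]
  exact ⟨_, by rw [List.append_assoc]; rfl⟩

-- one iteration of A's first-branch inner loop, against B's sliced group
theorem pv_innerA (P : String → Bool) (group ts : List String)
    (hts : ts = PySem.List.dedup (group.filter P)) (k : Nat) :
    group.foldl (pvAInner P (k : Int)) (PySem.Set.empty, ts.take k)
      = (pvBGroup group ts (k : Int), ts.take (k + 1)) := by
  by_cases hk : k < ts.length
  · -- the k-th distinct true cond exists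
    have hkt : (k : Int) < (ts.length : Int) := by exact_mod_cast hk
    set t := ts[k] with htdef
    have htmem : t ∈ ts := List.getElem_mem hk
    have htfil : t ∈ group.filter P := by
      rw [hts, PySem.List.mem_dedup] at htmem; exact htmem
    have htg : t ∈ group := List.mem_of_mem_filter htfil
    have hPt : P t = true := List.of_mem_filter htfil
    obtain ⟨j, hj⟩ : ∃ j, PySem.List.index? group t = some j := by
      have := (PySem.List.index?_isSome_iff group t).mpr htg
      exact Option.isSome_iff_exists.mp this
    obtain ⟨pre, suf, hsp, hjlen, hnpre⟩ := (PySem.List.index?_eq_some_iff group t j).mp hj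
    obtain ⟨r, hr⟩ : ∃ r, ts = PySem.Set.ofList (pre.filter P) ++ t :: r := by
      obtain ⟨r, hr⟩ := pv_ts_split P pre suf t hPt hnpre
      exact ⟨r, by rw [hts, hsp, hr]⟩
    set u := PySem.Set.ofList (pre.filter P) with hu
    have htnu : t ∉ u := by
      rw [hu, PySem.Set.mem_ofList]
      exact fun hmem => hnpre (List.mem_of_mem_filter hmem)
    have hul : u.length = k := by
      have h1 : u.length < ts.length := by rw [hr]; simp
      have h2 : ts[u.length]'h1 = t := by
        rw [List.getElem_of_eq hr]
        rw [List.getElem_append_right (le_refl u.length)]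
        simp
      have := (List.Nodup.getElem_inj_iff (by rw [hts]; exact PySem.List.nodup_dedup _)
        (i := u.length) (hi := h1) (j := k) (hj := hk)).mp (by rw [h2, htdef])
      omega
    have htake : ts.take k = u := by
      rw [hr]; exact List.take_left' hul
    have htake1 : ts.take (k + 1) = u ++ [t] := by
      have : ts = (u ++ [t]) ++ r := by rw [hr]; simp
      rw [this]; exact List.take_left' (by simp [hul])
    have hRHS : pvBGroup group ts (k : Int)
        = PySem.Set.ofList (pre ++ ("(!" ++ t ++ ")") :: suf) := by
      have htB : PySem.List.pyGetD ts (k : Int) "" = t := by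
        rw [PySem.List.pyGetD_natCast, List.getD_eq_getElem ts "" hk]
      simp only [pvBGroup, if_pos hkt, htB, hj, Option.getD_some]
      have hsl1 : PySem.List.slice group none (some (j : Int)) = pre := by
        rw [PySem.List.slice_to_natCast, hsp]
        exact List.take_left' hjlen
      have hsl2 : PySem.List.slice group (some ((j : Int) + 1)) none = suf := by
        have hc : ((j : Int) + 1) = ((j + 1 : Nat) : Int) := by push_cast; ring
        rw [hc, PySem.List.slice_from_natCast, hsp, ← List.singleton_append, ← List.append_assoc]
        exact List.drop_left' (by simp [hjlen])
      rw [hsl1, hsl2, List.append_assoc, List.singleton_append]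
    rw [hRHS]
    -- LHS
    rw [htake, hsp, List.foldl_append]
    rw [pv_skip_fold P (k : Int) pre PySem.Set.empty u (by
      intro c hc hPc
      rw [hu, PySem.Set.contains_iff, PySem.Set.mem_ofList]
      exact List.mem_filter.mpr ⟨hc, hPc⟩)]
    rw [List.foldl_cons]
    have hcontf : PySem.Set.contains u t = false := by
      rw [← Bool.not_eq_true, PySem.Set.contains_iff]; exact htnu
    have hstept : pvAInner P (k : Int) (pre.foldl PySem.Set.add PySem.Set.empty, u) t
        = (PySem.Set.add (pre.foldl PySem.Set.add PySem.Set.empty) ("(!" ++ t ++ ")"), u ++ [t]) := by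
      unfold pvAInner
      rw [if_pos ⟨hPt, by simp [PySem.Set.len, hul], hcontf⟩]
      rw [PySem.Set.add_of_not_mem htnu]
    rw [hstept]
    rw [pv_plain_fold P (k : Int) suf _ (u ++ [t]) (by simp [PySem.Set.len, hul])]
    refine Prod.ext ?_ (by simpa using htake1.symm)
    show suf.foldl PySem.Set.add _ = _
    rw [PySem.Set.ofList_eq_foldl, List.foldl_append, List.foldl_cons]
    rfl
  · -- no new true cond to negate
    rw [not_lt] at hk
    have htake : ts.take k = ts := List.take_of_length_le hk
    have htake1 : ts.take (k + 1) = ts := List.take_of_length_le (by omega)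
    rw [htake, htake1]
    rw [pv_skip_fold P (k : Int) group PySem.Set.empty ts (by
      intro c hc hPc
      rw [PySem.Set.contains_iff, hts, PySem.List.mem_dedup]
      exact List.mem_filter.mpr ⟨hc, hPc⟩)]
    unfold pvBGroup
    rw [if_neg (by exact_mod_cast not_lt.mpr hk)]
    rw [PySem.Set.ofList_eq_foldl]
    rfl

theorem pv_outer1 (P : String → Bool) (group ts : List String)
    (hts : ts = PySem.List.dedup (group.filter P)) (m : Nat) :
    (List.range m).foldl (fun st (k : Nat) => pvAOuter1 P group st (k : Int)) ([], PySem.Set.empty)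
      = ((List.range m).map (fun (k : Nat) => pvBGroup group ts (k : Int)), ts.take m) := by
  induction m with
  | zero => simp
  | succ m ih =>
    rw [List.range_succ, List.foldl_append, ih, List.map_append]
    rw [List.foldl_cons, List.foldl_nil]
    show pvAOuter1 P group _ (m : Int) = _
    unfold pvAOuter1
    rw [show (((List.range m).map fun k => pvBGroup group ts (k : Int)), ts.take m).2 = ts.take m from rfl]
    rw [pv_innerA P group ts hts m]
    rfl

-- ---- else branch ----

theorem pv_go_acc (sep : List Char) :
    ∀ (fuel : Nat) (l cur : List Char) (acc : List (List Char)) (a : List Char),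
      ∃ r, PySem.Chars.splitOn.go sep fuel l cur (acc ++ [a]) = a :: r := by
  intro fuel
  induction fuel with
  | zero =>
    intro l cur acc a
    rw [PySem.Chars.splitOn.go]
    exact ⟨acc.reverse ++ [cur.reverse ++ l], by simp⟩
  | succ fuel ih =>
    intro l cur acc a
    cases l with
    | nil =>
      rw [PySem.Chars.splitOn.go.eq_def]
      exact ⟨acc.reverse ++ [cur.reverse], by simp⟩
    | cons c rest =>
      rw [PySem.Chars.splitOn.go.eq_def]
      simp only []
      by_cases hp : sep.isPrefixOf (c :: rest)
      · simp only [hp, if_true]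
        have := ih (List.drop sep.length (c :: rest)) [] (cur.reverse :: acc) a
        simpa using this
      · simp only [hp]
        exact ih rest (c :: cur) acc a

theorem pv_go_head (sep : List Char) :
    ∀ (fuel : Nat) (l cur : List Char),
      ∃ d r, PySem.Chars.splitOn.go sep fuel l cur [] = (cur.reverse ++ d) :: r ∧ d <+: l := by
  intro fuel
  induction fuel with
  | zero =>
    intro l cur
    rw [PySem.Chars.splitOn.go]
    exact ⟨l, [], by simp⟩
  | succ fuel ih =>
    intro l cur
    cases l with
    | nil =>
      rw [PySem.Chars.splitOn.go.eq_def]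
      exact ⟨[], [], by simp⟩
    | cons c rest =>
      rw [PySem.Chars.splitOn.go.eq_def]
      simp only []
      by_cases hp : sep.isPrefixOf (c :: rest)
      · simp only [hp, if_true]
        obtain ⟨r, hr⟩ := pv_go_acc sep fuel (List.drop sep.length (c :: rest)) [] [] cur.reverse
        refine ⟨[], r, ?_, by simp⟩
        simpa using hr
      · simp only [hp]
        obtain ⟨d, r, hgo, hpre⟩ := ih rest (c :: cur)
        obtain ⟨tl, htl⟩ := hpre
        refine ⟨c :: d, r, ?_, ⟨tl, by simp [htl]⟩⟩
        rw [hgo]; simp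

-- cond.split('[')[0] is a prefix of cond, so `... in cond` is always True
theorem pv_third_true (cond : String) :
    PySem.Str.isIn (((PySem.Str.split? cond "[").getD []).getD 0 "") cond = true := by
  obtain ⟨d, r, hgo, hpre⟩ := pv_go_head "[".toList (cond.toList.length + 1) cond.toList []
  have hsplit : PySem.Str.split? cond "[" =
      some ((PySem.Chars.splitOn cond.toList "[".toList).map String.ofList) := by
    simp [PySem.Str.split?, PySem.Chars.split?]
  rw [hsplit]
  rw [PySem.Str.isIn_iff_infix]
  have hso : PySem.Chars.splitOn cond.toList "[".toList = d :: r := by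
    rw [PySem.Chars.splitOn, hgo]; simp
  rw [hso]
  simp only [Option.getD_some, List.map_cons, List.getD_cons_zero, String.toList_ofList]
  exact hpre.isInfix

-- hence extract_vars keeps every variable: its keys are exactly the dict's keys
theorem pv_ev_keys (cond : String) (vars : List (String × String)) :
    (extract_vars cond (PySem.Dict.ofList vars)).keys = (PySem.Dict.ofList vars).keys := by
  unfold extract_vars
  have hstep : (fun (vs : PySem.Dict String String) (p : String × String) =>
      if PySem.Str.isIn (p.1 ++ " ") cond || PySem.Str.isIn (p.1 ++ ")") cond
          || PySem.Str.isIn (((PySem.Str.split? cond "[").getD []).getD 0 "") cond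
      then vs.insert p.1 p.2 else vs) = fun vs p => vs.insert p.1 p.2 := by
    funext vs p
    rw [pv_third_true]
    simp
  rw [hstep]
  rw [PySem.Dict.keys_foldl_insert_key (PySem.Dict.ofList vars).items Prod.fst (fun _ p => p.2)
    PySem.Dict.empty]
  rw [PySem.Dict.keys_empty, PySem.Set.update_nil_left]
  have : ((PySem.Dict.ofList vars).items).map Prod.fst = (PySem.Dict.ofList vars).keys := rfl
  rw [this]
  exact PySem.Set.ofList_eq_self_of_nodup _ (by
    have := PySem.Dict.nodup_keys_ofList vars
    exact this)

theorem pv_keys_eq (vars : List (String × String)) :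
    (PySem.Dict.ofList vars).keys = PySem.Set.ofList (vars.map Prod.fst) := by
  have h1 := PySem.Dict.keys_foldl_insert_key (κ := String) (ν := String) (β := String × String)
    vars Prod.fst (fun _ p => p.2) PySem.Dict.empty
  simpa [PySem.Dict.ofList, PySem.Dict.update, PySem.Dict.keys_empty, PySem.Set.update_nil_left]
    using h1
theorem pv_keys_ne_nil (vars : List (String × String)) (hv : vars ≠ []) :
    (PySem.Dict.ofList vars).keys ≠ [] := by
  rw [pv_keys_eq]
  cases vars with
  | nil => exact absurd rfl hv
  | cons p t => simp [PySem.Set.ofList_cons]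

-- A's else inner loop builds {cond_neg} ∪ {cond.replace(last_key, new_var) | cond in group}
theorem pv_else_inner (group : List String) (vars : List (String × String)) (hv : vars ≠ [])
    (new_var : String) :
    ∀ (g0 : PySem.Set String) (s0 : String),
      (group.foldl
        (fun (p : PySem.Set String × String) cond =>
          let cond_vars := extract_vars cond (PySem.Dict.ofList vars)
          let cond_new := cond_vars.keys.foldl (fun _ v => PySem.Str.replace cond v new_var) p.2
          (PySem.Set.add p.1 cond_new, cond_new))
        (g0, s0)).1
      = (group.map (fun c =>
            PySem.Str.replace c (((PySem.Dict.ofList vars).keys).getLastD "") new_var)).foldl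
          PySem.Set.add g0 := by
  induction group with
  | nil => intro g0 s0; rfl
  | cons c t ih =>
    intro g0 s0
    rw [List.foldl_cons, List.map_cons, List.foldl_cons]
    have hks := pv_keys_ne_nil vars hv
    have hcn : (extract_vars c (PySem.Dict.ofList vars)).keys.foldl
        (fun _ v => PySem.Str.replace c v new_var) s0
        = PySem.Str.replace c (((PySem.Dict.ofList vars).keys).getLastD "") new_var := by
      rw [pv_ev_keys, pv_foldl_last (fun v => PySem.Str.replace c v new_var) _ s0 hks]
      rw [List.getLastD_eq_getLast?, List.getLast?_eq_some_getLast hks]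
      rfl
    simp only [hcn]
    exact ih _ _

theorem pv_else_outer (P : String → Bool) (group : List String) (vars : List (String × String))
    (hv : vars ≠ []) (m : Nat) :
    ∀ (gs : List (List String)) (nvs : List String) (s : String),
      ∃ s', (List.range m).foldl (fun st (k : Nat) => pvAElse P group vars st (k : Int)) (gs, nvs, s)
        = (gs ++ (List.range m).map (fun (k : Nat) =>
              PySem.Set.ofList ((match group.find? P with
                  | some c => "(!" ++ c ++ ")"
                  | none => "")
                :: group.map (fun c =>
                  PySem.Str.replace c (((PySem.Dict.ofList vars).keys).getLastD "")
                    ("c" ++ PySem.Int.toStr (k : Int))))),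
            nvs ++ (List.range m).map (fun (k : Nat) => "c" ++ PySem.Int.toStr (k : Int)), s') := by
  induction m with
  | zero => intro gs nvs s; exact ⟨s, by simp⟩
  | succ m ih =>
    intro gs nvs s
    obtain ⟨s1, hs1⟩ := ih gs nvs s
    rw [List.range_succ, List.foldl_append, hs1, List.foldl_cons, List.foldl_nil]
    refine ⟨?_, ?_⟩
    · exact (group.foldl
        (fun (p : PySem.Set String × String) cond =>
          let cond_vars := extract_vars cond (PySem.Dict.ofList vars)
          let cond_new := cond_vars.keys.foldl
            (fun _ v => PySem.Str.replace cond v ("c" ++ PySem.Int.toStr (m : Int))) p.2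
          (PySem.Set.add p.1 cond_new, cond_new))
        (PySem.Set.add PySem.Set.empty (match group.find? P with
            | some c => "(!" ++ c ++ ")"
            | none => ""), s1)).2
    show pvAElse P group vars _ (m : Int) = _
    unfold pvAElse
    refine Prod.ext ?_ (Prod.ext ?_ ?_)
    · show _ ++ [(group.foldl _ (_, s1)).1] = _
      rw [pv_else_inner group vars hv _ _ s1]
      simp only [List.map_append, List.map_cons, List.map_nil, List.append_assoc]
      rfl
    · simp
    · rfl

-- ---- replace is the identity when the pattern does not occur ----

theorem pv_go_replace_id (old new : List Char) :
    ∀ (fuel : Nat) (l acc : List Char), l.length ≤ fuel → ¬ old <:+: l →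
      PySem.Chars.replace.go old new fuel l acc = acc.reverse ++ l := by
  intro fuel
  induction fuel with
  | zero =>
    intro l acc hlen _
    rw [PySem.Chars.replace.go]
  | succ fuel ih =>
    intro l acc hlen hinf
    cases l with
    | nil =>
      rw [PySem.Chars.replace.go.eq_def]
      simp
    | cons c rest =>
      rw [PySem.Chars.replace.go.eq_def]
      simp only []
      have hp : old.isPrefixOf (c :: rest) = false := by
        rw [← Bool.not_eq_true, List.isPrefixOf_iff_prefix]
        exact fun h => hinf h.isInfix
      simp only [hp, Bool.false_eq_true, if_false]
      have := ih rest (c :: acc) (by simpa using Nat.le_of_succ_le_succ (by simpa using hlen))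
        (fun h => hinf (h.trans (List.suffix_cons c rest).isInfix))
      rw [this]
      simp

theorem pv_replace_id (s old new : String) (h : PySem.Str.isIn old s = false) :
    PySem.Str.replace s old new = s := by
  have hne : old.toList ≠ [] := by
    intro h0
    have : PySem.Str.isIn old s = true := by
      rw [PySem.Str.isIn_iff_infix, h0]; exact List.nil_infix
    rw [h] at this; exact absurd this (by simp)
  have hninf : ¬ old.toList <:+: s.toList := by
    intro hinf
    have : PySem.Str.isIn old s = true := (PySem.Str.isIn_iff_infix _ _).mpr hinf
    rw [h] at this; exact absurd this (by simp)
  show String.ofList (PySem.Chars.replace s.toList old.toList new.toList) = s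
  unfold PySem.Chars.replace
  rw [if_neg (by simpa [List.isEmpty_iff] using hne)]
  rw [pv_go_replace_id old.toList new.toList s.toList.length s.toList [] (le_refl _) hninf]
  simp

-- a run of no-op replacements leaves the string unchanged
theorem pv_fold_replace_id (nv : String) :
    ∀ (ks : List String) (c : String), (∀ k ∈ ks, PySem.Str.isIn k c = false) →
      ks.foldl (fun c v => PySem.Str.replace c v nv) c = c := by
  intro ks
  induction ks with
  | nil => intro c _; rfl
  | cons k t ih =>
    intro c h
    rw [List.foldl_cons, pv_replace_id c k nv (h k (by simp))]
    exact ih c (fun k hk => h k (by simp [hk]))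

-- when no key but the last occurs in c, B's cumulative replacement equals the last replacement
theorem pv_fold_replace_last (keys : List String) (hk : keys ≠ []) (c nv : String)
    (h : ∀ k ∈ keys.dropLast, PySem.Str.isIn k c = false) :
    keys.foldl (fun c v => PySem.Str.replace c v nv) c
      = PySem.Str.replace c (keys.getLastD "") nv := by
  conv_lhs => rw [← List.dropLast_append_getLast hk]
  rw [List.foldl_append, pv_fold_replace_id nv keys.dropLast c h]
  rw [List.foldl_cons, List.foldl_nil]
  rw [List.getLastD_eq_getLast?, List.getLast?_eq_some_getLast hk]
  rfl

theorem pv_fold_add_map (F Fa : String → String) :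
    ∀ (l : List String) (init : PySem.Set String), (∀ c ∈ l, F c = Fa c) →
      l.foldl (fun g c => PySem.Set.add g (F c)) init
        = l.foldl (fun g c => PySem.Set.add g (Fa c)) init := by
  intro l
  induction l with
  | nil => intro init _; rfl
  | cons c t ih =>
    intro init h
    rw [List.foldl_cons, List.foldl_cons, h c (by simp)]
    exact ih _ (fun c hc => h c (by simp [hc]))

-- B's else-branch group, when only the last key can occur in any cond
theorem pv_B_else_group (keys : List String) (hk : keys ≠ []) (neg : String)
    (group : List String) (nv : String)
    (h : ∀ c ∈ group, ∀ k ∈ keys.dropLast, PySem.Str.isIn k c = false) :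
    pvBElseGroup keys neg group nv
      = PySem.Set.ofList
          (neg :: group.map (fun c => PySem.Str.replace c (keys.getLastD "") nv)) := by
  unfold pvBElseGroup
  rw [PySem.Set.ofList_eq_foldl, List.foldl_cons, List.foldl_map]
  exact pv_fold_add_map _ _ group _
    (fun c hc => pv_fold_replace_last keys hk c nv (h c hc))

-- ===== VERDICT (by name: the statements are the Claim_ definitions above) =====
theorem get_negated_spec : Claim_unchanged_get_negated := by
  intro conds group vars numb hdom hpre
  unfold Spec_get_negated
  intro hnd
  obtain ⟨hkeys, helse⟩ := hpre
  simp only [get_negated, get_negated_alt]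
  have hn : group.foldl (fun n c => if pvP conds c then n + 1 else n) 0
      = ((group.filter (pvP conds)).length : Int) := by
    rw [PySem.List.foldl_count_if (pvP conds) group 0, List.countP_eq_length_filter]
    ring
  rw [hn]
  by_cases hb : ((group.filter (pvP conds)).length : Int) ≥ numb
  · rw [if_pos hb, if_pos hb]
    rw [PySem.List.pyRange_one 0 numb]
    simp only [zero_add, Int.sub_zero, List.foldl_map, List.map_map, Function.comp_def]
    rw [pv_outer1 (pvP conds) group _ rfl (numb).toNat]
  · rw [if_neg hb, if_neg hb]
    have hlt : ((group.filter (pvP conds)).length : Int) < numb := by omega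
    have hcnt : ((List.countP (pvP conds) group : Nat) : Int) < numb := by
      rw [List.countP_eq_length_filter]; exact hlt
    obtain ⟨hne, hv⟩ := helse hcnt
    have hall : ∀ c ∈ group, ∀ k ∈ ((PySem.Dict.ofList vars).keys).dropLast,
        PySem.Str.isIn k c = false := by
      intro c hc k hkm
      rw [← Bool.not_eq_true]
      intro hkc
      exact hnd ⟨hcnt, c, hc, k, by rwa [pv_keys_eq] at hkm, hkc⟩
    have hks := pv_keys_ne_nil vars hv
    rw [PySem.List.pyRange_one 0 numb]
    simp only [zero_add, Int.sub_zero, List.foldl_map, List.map_map, Function.comp_def]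
    obtain ⟨s1, hs1⟩ := pv_else_outer (pvP conds) group vars hv (numb).toNat [] [] ""
    have hneg : (match List.find? (pvP conds) group with
        | some c => "(!" ++ c ++ ")"
        | none => "")
        = "(!" ++ PySem.List.pyGetD (List.filter (pvP conds) group) 0 "" ++ ")" := by
      obtain ⟨h0, t0, ht0⟩ := List.exists_cons_of_ne_nil hne
      rw [← List.head?_filter, ht0]
      simp [PySem.List.pyGetD_zero]
    have hBg : ∀ nv, pvBElseGroup (PySem.Dict.ofList vars).keys
          ("(!" ++ PySem.List.pyGetD (List.filter (pvP conds) group) 0 "" ++ ")") group nv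
        = PySem.Set.ofList
            (("(!" ++ PySem.List.pyGetD (List.filter (pvP conds) group) 0 "" ++ ")")
              :: group.map (fun c =>
                PySem.Str.replace c (((PySem.Dict.ofList vars).keys).getLastD "") nv)) :=
      fun nv => pv_B_else_group _ hks _ group nv hall
    rw [hs1]
    simp only [List.nil_append, hneg, hBg]
theorem get_negated_changed : Claim_changed_get_negated := by
  unfold Claim_changed_get_negated; decide
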